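-- pv_equiv track=rewrite | github.com/TPVPfaller/Bwinf38_R1 | MainA1.py | fill_in
-- ===== SOURCE A (Python) =====
-- def fill_in(arrangement):
--     used_flowers = []
--     used_places = []
--     for f, b in arrangement:  # Füllt die leeren Plätze mit Blumen auf
--         used_flowers.append(f)
--         used_places.append(b)
--     for f in range(7): # Iteration durch alle Farben
--         for b in range(9): # Iteration durch alle Plätze
--             if f not in used_flowers and b not in used_places: # Wenn die Blume und der Platz noch nicht verwendet
--                 # wurden
--                 used_flowers.append(f)
--                 used_places.append(b)
--                 arrangement.append((f, b))
--                 if len(arrangement) == 9: # Wenn alle Plätze voll sind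
--                     return arrangement
-- ===== SOURCE B (Python) =====
-- def fill_in(arrangement):
--     used_flowers = {f for f, _ in arrangement}
--     used_places = {b for _, b in arrangement}
--     available = [b for b in range(9) if b not in used_places]
--     i = 0
--     for f in range(7):
--         if f not in used_flowers and i < len(available):
--             arrangement.append((f, available[i]))
--             i += 1
--             if len(arrangement) == 9:
--                 return arrangement
-- ===== Notes on version B (the rewrite author's own statement) =====
-- stated objective: simpler
-- what changed: Replaces A's nested 7x9 loops with append-lists (inner pass rescans all 9 places and both growing lists per flower) by membership sets plus one precomputed ordered list of free places consumed with a single index pointer.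
import Mathlib
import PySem

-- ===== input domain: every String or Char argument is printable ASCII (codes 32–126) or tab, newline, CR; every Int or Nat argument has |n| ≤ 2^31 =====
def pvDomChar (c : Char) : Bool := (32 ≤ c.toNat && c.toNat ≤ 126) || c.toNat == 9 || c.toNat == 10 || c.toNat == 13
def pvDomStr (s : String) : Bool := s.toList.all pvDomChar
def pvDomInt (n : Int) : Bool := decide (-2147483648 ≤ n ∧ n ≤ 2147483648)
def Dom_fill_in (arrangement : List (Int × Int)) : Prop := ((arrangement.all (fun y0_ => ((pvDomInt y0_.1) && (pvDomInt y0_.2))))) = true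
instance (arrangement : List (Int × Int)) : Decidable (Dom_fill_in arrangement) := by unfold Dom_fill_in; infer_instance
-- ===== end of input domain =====

-- B replaces A's nested 7×9 rescan of used places by membership sets plus a single
-- pre-computed ordered list of free places consumed by an index pointer (objective: simpler).
-- Equivalence is about the RETURN value; both Pythons append the same pairs to `arrangement` in place.

-- ===== PORT A =====
-- inner `for b in range(9)` loop; .inr = early `return arrangement`, .inl = fall through with state
def fillInInner (f : Int) : List Int → List Int → List Int → List (Int × Int) →
    (List Int × List Int × List (Int × Int)) ⊕ List (Int × Int)
  | [], uf, up, arr => .inl (uf, up, arr)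
  | b :: bs, uf, up, arr =>
    if f ∉ uf ∧ b ∉ up then
      let uf' := uf ++ [f]
      let up' := up ++ [b]
      let arr' := arr ++ [(f, b)]
      if arr'.length = 9 then .inr arr'
      else fillInInner f bs uf' up' arr'
    else fillInInner f bs uf up arr

-- outer `for f in range(7)` loop
def fillInOuter : List Int → List Int → List Int → List (Int × Int) → Option (List (Int × Int))
  | [], _, _, _ => none
  | f :: fs, uf, up, arr =>
    match fillInInner f (PySem.List.pyRange 0 9 1) uf up arr with
    | .inr res => some res
    | .inl (uf', up', arr') => fillInOuter fs uf' up' arr'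

def fill_in (arrangement : List (Int × Int)) : Option (List (Int × Int)) :=
  -- first loop: used_flowers.append(f); used_places.append(b)
  let s := arrangement.foldl (fun (s : List Int × List Int) p => (s.1 ++ [p.1], s.2 ++ [p.2])) ([], [])
  fillInOuter (PySem.List.pyRange 0 7 1) s.1 s.2 arrangement

-- ===== PORT B =====
-- `for f in range(7)` with pointer i into `available` (available[i] is guarded by i < len, so getD is exact)
def fillInAltLoop (usedF : PySem.Set Int) (available : List Int) :
    List Int → Nat → List (Int × Int) → Option (List (Int × Int))
  | [], _, _ => none
  | f :: fs, i, arr =>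
    if f ∉ usedF ∧ i < available.length then
      let arr' := arr ++ [(f, available.getD i 0)]
      if arr'.length = 9 then some arr'
      else fillInAltLoop usedF available fs (i + 1) arr'
    else fillInAltLoop usedF available fs i arr

def fill_in_alt (arrangement : List (Int × Int)) : Option (List (Int × Int)) :=
  let usedF : PySem.Set Int := PySem.Set.ofList (arrangement.map (·.1))
  let usedP : PySem.Set Int := PySem.Set.ofList (arrangement.map (·.2))
  let available := (PySem.List.pyRange 0 9 1).filter (fun b => decide (b ∉ usedP))
  fillInAltLoop usedF available (PySem.List.pyRange 0 7 1) 0 arrangement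

-- ===== PRECONDITION & SPEC =====
def Spec_fill_in (arrangement : List (Int × Int)) (out : Option (List (Int × Int))) : Prop := out = fill_in_alt arrangement
instance (arrangement : List (Int × Int)) (out : Option (List (Int × Int))) : Decidable (Spec_fill_in arrangement out) := by unfold Spec_fill_in; infer_instance

-- ===== CLAIM (what is proved, stated in full; the proofs are below) =====
def Claim_equal_fill_in : Prop := ∀ (arrangement : List (Int × Int)), Dom_fill_in arrangement → Spec_fill_in arrangement (fill_in arrangement)

-- ===== LEMMAS AND PROOFS =====

lemma foldl_pair_append (l : List (Int × Int)) (a b : List Int) :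
    l.foldl (fun (s : List Int × List Int) p => (s.1 ++ [p.1], s.2 ++ [p.2])) (a, b)
      = (a ++ l.map (·.1), b ++ l.map (·.2)) := by
  induction l generalizing a b with
  | nil => simp
  | cons p l ih => simp [List.foldl_cons, ih]

lemma fillInInner_mem (f : Int) (bs uf up : List Int) (arr : List (Int × Int)) (hf : f ∈ uf) :
    fillInInner f bs uf up arr = .inl (uf, up, arr) := by
  induction bs with
  | nil => rfl
  | cons b bs ih =>
    simp only [fillInInner]
    rw [if_neg (by tauto)]
    exact ih

lemma fillInInner_not_mem (f : Int) (bs uf up : List Int) (arr : List (Int × Int)) (hf : f ∉ uf) :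
    fillInInner f bs uf up arr =
      match bs.filter (fun b => decide (b ∉ up)) with
      | [] => .inl (uf, up, arr)
      | b :: _ =>
        if arr.length + 1 = 9 then .inr (arr ++ [(f, b)])
        else .inl (uf ++ [f], up ++ [b], arr ++ [(f, b)]) := by
  induction bs with
  | nil => rfl
  | cons b bs ih =>
    by_cases hb : b ∈ up
    · simp only [fillInInner]
      rw [if_neg (by tauto)]
      rw [ih]
      simp [hb]
    · simp only [fillInInner]
      rw [if_pos ⟨hf, hb⟩]
      simp only [List.filter_cons, decide_eq_true_eq, hb, not_false_iff, if_pos, List.length_append,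
        List.length_cons, List.length_nil]
      by_cases h9 : arr.length + 1 = 9
      · simp [h9]
      · rw [if_neg (by simpa using h9)]
        rw [fillInInner_mem _ _ _ _ _ (by simp)]
        simp [h9]

lemma fillInInner_filter_nil (f : Int) (bs uf up : List Int) (arr : List (Int × Int))
    (hf : f ∉ uf) (h : bs.filter (fun b => decide (b ∉ up)) = []) :
    fillInInner f bs uf up arr = .inl (uf, up, arr) := by
  rw [fillInInner_not_mem _ _ _ _ _ hf, h]

lemma fillInInner_filter_cons (f : Int) (bs uf up : List Int) (arr : List (Int × Int))
    (b : Int) (rest : List Int) (hf : f ∉ uf)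
    (h : bs.filter (fun b => decide (b ∉ up)) = b :: rest) :
    fillInInner f bs uf up arr =
      if arr.length + 1 = 9 then .inr (arr ++ [(f, b)])
      else .inl (uf ++ [f], up ++ [b], arr ++ [(f, b)]) := by
  rw [fillInInner_not_mem _ _ _ _ _ hf, h]

lemma loop_eq (usedF : PySem.Set Int) (available : List Int) (hav : available.Nodup)
    (fs : List Int) (hfs : fs.Nodup) :
    ∀ (uf up : List Int) (i : Nat) (arr : List (Int × Int)),
      (∀ g ∈ fs, (g ∈ uf ↔ g ∈ usedF)) →
      ((PySem.List.pyRange 0 9 1).filter (fun b => decide (b ∉ up)) = available.drop i) →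
      fillInOuter fs uf up arr = fillInAltLoop usedF available fs i arr := by
  induction fs with
  | nil => intro uf up i arr _ _; rfl
  | cons f fs ih =>
    intro uf up i arr h1 h2
    have hfnotfs : f ∉ fs := (List.nodup_cons.mp hfs).1
    have hfs' : fs.Nodup := (List.nodup_cons.mp hfs).2
    by_cases hf : f ∈ uf
    · have hfF : f ∈ usedF := (h1 f (by simp)).mp hf
      simp only [fillInOuter, fillInAltLoop]
      rw [fillInInner_mem _ _ _ _ _ hf, if_neg (by tauto)]
      exact ih hfs' uf up i arr (fun g hg => h1 g (by simp [hg])) h2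
    · have hfF : f ∉ usedF := fun h => hf ((h1 f (by simp)).mpr h)
      simp only [fillInOuter, fillInAltLoop]
      rcases hdrop : available.drop i with _ | ⟨b, rest⟩
      · have hlen : available.length ≤ i := List.drop_eq_nil_iff.mp hdrop
        rw [fillInInner_filter_nil f _ uf up arr hf (h2.trans hdrop),
          if_neg (show ¬(f ∉ usedF ∧ i < available.length) from fun h => absurd h.2 (by omega))]
        exact ih hfs' uf up i arr (fun g hg => h1 g (by simp [hg])) h2
      · have hlt : i < available.length := by
          by_contra h
          rw [List.drop_eq_nil_iff.mpr (by omega)] at hdrop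
          cases hdrop
        have hb : available[i] = b := by
          have := List.drop_eq_getElem_cons hlt
          rw [hdrop] at this
          exact (List.cons.injEq .. ▸ this).1.symm
        have hrest : available.drop (i + 1) = rest := by
          have := List.drop_eq_getElem_cons hlt
          rw [hdrop] at this
          exact (List.cons.injEq .. ▸ this).2.symm
        have hgd : available.getD i 0 = b := by
          rw [List.getD_eq_getElem _ _ hlt, hb]
        rw [fillInInner_filter_cons f _ uf up arr b rest hf (h2.trans hdrop), if_pos (show f ∉ usedF ∧ i < available.length from ⟨hfF, hlt⟩)]
        by_cases h9 : arr.length + 1 = 9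
        · rw [if_pos h9]
          simp [h9, List.getElem?_eq_getElem hlt, hb]
        · rw [if_neg h9, hgd, if_neg (show ¬((arr ++ [(f, b)]).length = 9) by simpa using h9)]
          refine ih hfs' _ _ (i + 1) _ ?_ ?_
          · intro g hg
            have hgf : g ≠ f := fun h => hfnotfs (h ▸ hg)
            simp only [List.mem_append, List.mem_singleton]
            rw [h1 g (by simp [hg])]
            tauto
          · -- membership in up ++ [b] splits; removing b from b :: rest leaves rest (nodup)
            have hnd : (b :: rest).Nodup := by
              rw [← hdrop]; exact hav.sublist (List.drop_sublist _ _)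
            have hbrest : b ∉ rest := (List.nodup_cons.mp hnd).1
            have step1 : (PySem.List.pyRange 0 9 1).filter (fun x => decide (x ∉ up ++ [b]))
                = ((PySem.List.pyRange 0 9 1).filter (fun x => decide (x ∉ up))).filter (fun x => decide (x ≠ b)) := by
              rw [List.filter_filter]
              apply List.filter_congr
              intro x _
              simp [List.mem_append, not_or, and_comm]
            rw [step1, h2, hdrop, hrest]
            rw [List.filter_cons]
            simp only [decide_eq_true_eq, ne_eq, not_true_eq_false, if_false]
            exact List.filter_eq_self.mpr (fun x hx => by
              simp only [decide_eq_true_eq]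
              exact fun h => hbrest (h ▸ hx))

-- ===== VERDICT (by name: the statement is the Claim_ definition above) =====
theorem fill_in_spec : Claim_equal_fill_in := by
  intro arrangement _
  unfold Spec_fill_in fill_in fill_in_alt
  rw [show (([], []) : List Int × List Int) = (([] : List Int), ([] : List Int)) from rfl]
  rw [foldl_pair_append]
  apply loop_eq
  · exact (PySem.List.nodup_pyRange_one 0 9).filter _
  · exact PySem.List.nodup_pyRange_one 0 7
  · intro g _
    simp [PySem.Set.mem_ofList]
  · rw [List.drop_zero]
    apply List.filter_congr
    intro x _
    simp [PySem.Set.mem_ofList]
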